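-- pv_equiv track=rewrite | github.com/fazlelhakeem/Praktikum-StrukDat-C-2026 | Kuis_1/25071105226_FazlElHakeemWilmar/soal4.py | hitung_komisi
-- ===== SOURCE A (Python) =====
-- def hitung_komisi(total_penjualan, skema, index = 0):
--    if index == 3:
--       return 0
--    elif total_penjualan >= skema[index][0]:
--       return int(skema[index][1])
--    else:
--       index += 1
--       return hitung_komisi(total_penjualan, skema, index)
-- ===== SOURCE B (Python) =====
-- def hitung_komisi(total_penjualan, skema, index=0):
--     # Iterate over the tier positions up to the cutoff 3; first matching tier wins.
--     for i in range(index, 3):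
--         if total_penjualan >= skema[i][0]:
--             return int(skema[i][1])
--     return 0
-- ===== Notes on version B (the rewrite author's own statement) =====
-- stated objective: simpler
-- what changed: Replaced the index-threading self-recursion by an iterative for-loop over the materialized position range(index, 3) that returns the first matching tier, else 0.
-- outside the precondition, e.g. on hitung_komisi(10, [(1, 1), (1, 2), (1, 3), (1, 4), (1, 5)], 4): A returns 5, B returns 0
import Mathlib
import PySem

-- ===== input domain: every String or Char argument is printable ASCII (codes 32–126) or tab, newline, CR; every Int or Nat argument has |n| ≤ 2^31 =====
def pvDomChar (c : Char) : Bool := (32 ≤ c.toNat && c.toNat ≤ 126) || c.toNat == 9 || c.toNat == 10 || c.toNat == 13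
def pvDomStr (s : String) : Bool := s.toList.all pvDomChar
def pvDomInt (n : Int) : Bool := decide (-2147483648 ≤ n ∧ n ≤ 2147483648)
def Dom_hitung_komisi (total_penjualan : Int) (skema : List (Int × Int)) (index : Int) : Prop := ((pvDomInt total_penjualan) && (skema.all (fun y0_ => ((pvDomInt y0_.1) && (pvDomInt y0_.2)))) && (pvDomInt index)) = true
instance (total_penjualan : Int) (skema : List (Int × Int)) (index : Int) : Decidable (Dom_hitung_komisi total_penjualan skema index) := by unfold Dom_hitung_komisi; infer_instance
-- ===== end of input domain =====

-- B replaces A's index-threading self-recursion by an iterative loop over range(index, 3)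
-- returning the first matching tier; same cost, simpler.

-- ===== PORT A =====
-- Literal port of A's recursion; `skema[index]` is PySem.List.pyGet? (none = IndexError, excluded by Pre_).
def hitung_komisi (total_penjualan : Int) (skema : List (Int × Int)) (index : Int) : Int :=
  if index = 3 then 0
  else
    match h : PySem.List.pyGet? skema index with
    | none => 0   -- IndexError in Python; Pre_ excludes these inputs
    | some p =>
      if total_penjualan ≥ p.1 then p.2
      else hitung_komisi total_penjualan skema (index + 1)
termination_by (max (3 - index) ((skema.length : Int) - index)).toNat
decreasing_by
  have hin : ¬ (PySem.List.pyGet? skema index = none) := by simp [h]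
  rw [PySem.List.pyGet?_eq_none_iff] at hin
  have := not_not.mp hin
  unfold PySem.Raise.InRange at this
  omega

-- ===== PORT B =====
-- the body of `for i in range(index, 3): ...` with its early return, as structural
-- recursion over the position list; `skema[i]` is pyGet? (none = IndexError, excluded by Pre_)
def hkLoop (total_penjualan : Int) (skema : List (Int × Int)) : List Int → Int
  | [] => 0                                   -- loop fell through: return 0
  | i :: rest =>
    match PySem.List.pyGet? skema i with
    | none => 0                               -- IndexError in Python; Pre_ excludes these inputs
    | some p => if total_penjualan ≥ p.1 then p.2 else hkLoop total_penjualan skema rest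

def hitung_komisi_alt (total_penjualan : Int) (skema : List (Int × Int)) (index : Int) : Int :=
  hkLoop total_penjualan skema (PySem.List.pyRange index 3 1)

-- ===== PRECONDITION & SPEC =====
-- some tier at position j ∈ [index, len) (Python indexing, so negative j wraps) matches total_penjualan
def pvMatchFrom (total_penjualan : Int) (skema : List (Int × Int)) (index : Int) : Bool :=
  (List.range ((skema.length : Int) - index).toNat).any (fun k =>
    match PySem.List.pyGet? skema (index + k) with
    | some p => decide (total_penjualan ≥ p.1)
    | none => false)

-- Pre_ excludes (besides the inputs where A raises IndexError) start indices past the tier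
-- cutoff 3, where A's recursion accidentally keeps scanning beyond the cutoff and may return a
-- tier; B naturally returns 0 there, as for any start at or past the cutoff.
def Pre_hitung_komisi (total_penjualan : Int) (skema : List (Int × Int)) (index : Int) : Prop :=
  index = 3 ∨
  (index < 3 ∧ -(skema.length : Int) ≤ index ∧
    (3 ≤ (skema.length : Int) ∨ pvMatchFrom total_penjualan skema index = true))
instance (total_penjualan : Int) (skema : List (Int × Int)) (index : Int) : Decidable (Pre_hitung_komisi total_penjualan skema index) := by unfold Pre_hitung_komisi; infer_instance

def pvWitness_hitung_komisi : Int × (List (Int × Int)) × Int := (10, [(5, 2), (20, 5), (50, 9)], 0)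

def Spec_hitung_komisi (total_penjualan : Int) (skema : List (Int × Int)) (index : Int) (out : Int) : Prop := out = hitung_komisi_alt total_penjualan skema index
instance (total_penjualan : Int) (skema : List (Int × Int)) (index : Int) (out : Int) : Decidable (Spec_hitung_komisi total_penjualan skema index out) := by unfold Spec_hitung_komisi; infer_instance

-- ===== CLAIM (what is proved, stated in full; the proofs are below) =====
def Claim_equal_hitung_komisi : Prop := ∀ (total_penjualan : Int) (skema : List (Int × Int)) (index : Int), Dom_hitung_komisi total_penjualan skema index → Pre_hitung_komisi total_penjualan skema index → Spec_hitung_komisi total_penjualan skema index (hitung_komisi total_penjualan skema index)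

-- ===== LEMMAS AND PROOFS =====
-- For every start index ≤ 3 the two ports agree (both return 0 at the first out-of-range probe,
-- so no precondition beyond index ≤ 3 is needed here).
lemma hk_eq_loop (total_penjualan : Int) (skema : List (Int × Int)) :
    ∀ (n : Nat) (index : Int), index ≤ 3 → (3 - index).toNat = n →
      hitung_komisi total_penjualan skema index =
        hkLoop total_penjualan skema (PySem.List.pyRange index 3 1) := by
  intro n
  induction n with
  | zero =>
    intro index hle hn
    have h3 : index = 3 := by omega
    subst h3
    rw [hitung_komisi]
    simp [hkLoop]
  | succ m ih =>
    intro index hle hn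
    have hlt : index < 3 := by omega
    rw [PySem.List.pyRange_one_cons (by omega : index < 3)]
    rw [hitung_komisi, hkLoop]
    simp only [if_neg (by omega : ¬ index = 3)]
    cases h : PySem.List.pyGet? skema index with
    | none => rfl
    | some p =>
      by_cases hm : total_penjualan ≥ p.1
      · simp [hm]
      · simp only [if_neg hm]
        exact ih (index + 1) (by omega) (by omega)

-- ===== VERDICT (by name: the statement is the Claim_ definition above) =====
theorem hitung_komisi_spec : Claim_equal_hitung_komisi := by
  intro total_penjualan skema index _ hpre
  have hle : index ≤ 3 := by
    rcases hpre with h | ⟨h, _⟩ <;> omega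
  exact hk_eq_loop total_penjualan skema _ index hle rfl
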